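-- pv_equiv track=rewrite | github.com/SharathSPhD/acorn | api/routers/kernels.py | _parse_kernel_md
-- ===== SOURCE A (Python) =====
-- def _parse_kernel_md(content: str) -> tuple[str, str, str, list[str]]:
--     """Extract name, description, category, and keywords from a KERNEL.md file."""
--     lines = content.strip().split("\n")
--     name = ""
--     description = ""
--     category = "general"
--     keywords: list[str] = []
--
--     for line in lines:
--         stripped = line.strip()
--         if stripped.startswith("# ") and not name:
--             name = stripped[2:].strip()
--         elif stripped.lower().startswith("category:"):
--             category = stripped.split(":", 1)[1].strip().lower()
--         elif stripped.lower().startswith("keywords:"):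
--             kw_str = stripped.split(":", 1)[1].strip()
--             keywords = [k.strip() for k in kw_str.split(",") if k.strip()]
--         elif stripped and not description and not stripped.startswith("#"):
--             description = stripped
--
--     return name, description, category, keywords
-- ===== SOURCE B (Python) =====
-- def _parse_kernel_md(content: str) -> tuple[str, str, str, list[str]]:
--     """Extract name, description, category, and keywords from a KERNEL.md file."""
--     lines = [raw.strip() for raw in content.strip().split("\n")]
--
--     def is_cat(s: str) -> bool:
--         return s.lower().startswith("category:")
--
--     def is_kw(s: str) -> bool:
--         return s.lower().startswith("keywords:")
--
--     # name: first '# '-heading; description: first plain text line.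
--     name = next((s[2:].strip() for s in lines if s.startswith("# ")), "")
--     description = next(
--         (s for s in lines
--          if s and not s.startswith("#") and not is_cat(s) and not is_kw(s)),
--         "")
--
--     # category / keywords: last matching line wins.
--     category = "general"
--     for s in reversed(lines):
--         if is_cat(s):
--             category = s.split(":", 1)[1].strip().lower()
--             break
--
--     keywords: list[str] = []
--     for s in reversed(lines):
--         if is_kw(s):
--             kw_str = s.split(":", 1)[1].strip()
--             keywords = [k.strip() for k in kw_str.split(",") if k.strip()]
--             break
--
--     return name, description, category, keywords
-- ===== Notes on version B (the rewrite author's own statement) =====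
-- stated objective: alternative
-- what changed: A's single stateful loop with shared first/last-match flags is replaced by four independent extractions over the stripped lines: name and description as the first matching line (next over a generator), category and keywords as the last matching line (reversed scan with break).
import Mathlib
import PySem

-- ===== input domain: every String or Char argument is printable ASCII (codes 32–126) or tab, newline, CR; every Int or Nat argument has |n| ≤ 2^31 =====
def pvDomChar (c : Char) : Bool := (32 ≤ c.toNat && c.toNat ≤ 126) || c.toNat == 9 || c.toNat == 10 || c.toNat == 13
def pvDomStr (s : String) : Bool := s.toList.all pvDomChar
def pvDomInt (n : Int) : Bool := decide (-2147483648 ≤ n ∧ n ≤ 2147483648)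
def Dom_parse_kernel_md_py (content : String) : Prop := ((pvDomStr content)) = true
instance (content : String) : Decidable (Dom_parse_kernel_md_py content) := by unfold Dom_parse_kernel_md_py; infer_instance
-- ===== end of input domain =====

-- B replaces A's single stateful loop by independent per-field extractions (first/last matching line); alternative decomposition, same O(n) cost.

-- ===== PORT A =====
-- one iteration of A's for-loop; state = (name, description, category, keywords)
def pvAStep (st : String × String × String × List String) (line : String) :
    String × String × String × List String :=
  let stripped := PySem.Str.strip line
  if PySem.Str.startswith stripped "# " && st.1 == "" then
    (PySem.Str.strip (PySem.Str.slice stripped (some 2) none), st.2.1, st.2.2.1, st.2.2.2)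
  else if PySem.Str.startswith (PySem.Str.lower stripped) "category:" then
    -- split(":",1)[1]: the guard guarantees ':' occurs, so index 1 exists and the getD defaults are unreachable
    (st.1, st.2.1,
      PySem.Str.lower (PySem.Str.strip ((PySem.List.pyGet? ((PySem.Str.splitMax? stripped ":" 1).getD []) 1).getD "")),
      st.2.2.2)
  else if PySem.Str.startswith (PySem.Str.lower stripped) "keywords:" then
    let kw_str := PySem.Str.strip ((PySem.List.pyGet? ((PySem.Str.splitMax? stripped ":" 1).getD []) 1).getD "")
    (st.1, st.2.1, st.2.2.1,
      (((PySem.Str.split? kw_str ",").getD []).map PySem.Str.strip).filter (fun k => !(k == "")))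
  else if !(stripped == "") && st.2.1 == "" && !PySem.Str.startswith stripped "#" then
    (st.1, stripped, st.2.2.1, st.2.2.2)
  else
    st

def parse_kernel_md_py (content : String) : String × String × String × List String :=
  -- content.strip().split("\n"): sep ≠ "" so split? is always some; getD unreachable
  ((PySem.Str.split? (PySem.Str.strip content) "\n").getD []).foldl pvAStep ("", "", "general", [])

-- ===== PORT B =====
def pvIsCat (s : String) : Bool := PySem.Str.startswith (PySem.Str.lower s) "category:"
def pvIsKw (s : String) : Bool := PySem.Str.startswith (PySem.Str.lower s) "keywords:"
-- s.split(":", 1)[1].strip() (the guard in both call sites guarantees ':' occurs; getD defaults unreachable)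
def pvColonRest (s : String) : String :=
  PySem.Str.strip ((PySem.List.pyGet? ((PySem.Str.splitMax? s ":" 1).getD []) 1).getD "")

def parse_kernel_md_py_alt (content : String) : String × String × String × List String :=
  let lines := ((PySem.Str.split? (PySem.Str.strip content) "\n").getD []).map PySem.Str.strip
  let name := match lines.find? (fun s => PySem.Str.startswith s "# ") with
    | some s => PySem.Str.strip (PySem.Str.slice s (some 2) none)
    | none => ""
  let description := match lines.find?
      (fun s => !(s == "") && !PySem.Str.startswith s "#" && !pvIsCat s && !pvIsKw s) with
    | some s => s
    | none => ""
  let category := match lines.reverse.find? pvIsCat with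
    | some s => PySem.Str.lower (pvColonRest s)
    | none => "general"
  let keywords := match lines.reverse.find? pvIsKw with
    | some s => (((PySem.Str.split? (pvColonRest s) ",").getD []).map PySem.Str.strip).filter (fun k => !(k == ""))
    | none => ([] : List String)
  (name, description, category, keywords)

-- ===== PRECONDITION & SPEC =====
def Spec_parse_kernel_md_py (content : String) (out : String × String × String × List String) : Prop := out = parse_kernel_md_py_alt content
instance (content : String) (out : String × String × String × List String) : Decidable (Spec_parse_kernel_md_py content out) := by unfold Spec_parse_kernel_md_py; infer_instance

-- ===== CLAIM (what is proved, stated in full; the proofs are below) =====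
def Claim_equal_parse_kernel_md_py : Prop := ∀ (content : String), Dom_parse_kernel_md_py content → Spec_parse_kernel_md_py content (parse_kernel_md_py content)

-- ===== LEMMAS AND PROOFS =====

-- A's step expressed on the already-stripped line (pvAStep st l = pvStepS st (strip l) by rfl)
def pvStepS (st : String × String × String × List String) (s : String) :
    String × String × String × List String :=
  if PySem.Str.startswith s "# " && st.1 == "" then
    (PySem.Str.strip (PySem.Str.slice s (some 2) none), st.2.1, st.2.2.1, st.2.2.2)
  else if PySem.Str.startswith (PySem.Str.lower s) "category:" then
    (st.1, st.2.1,
      PySem.Str.lower (PySem.Str.strip ((PySem.List.pyGet? ((PySem.Str.splitMax? s ":" 1).getD []) 1).getD "")),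
      st.2.2.2)
  else if PySem.Str.startswith (PySem.Str.lower s) "keywords:" then
    (st.1, st.2.1, st.2.2.1,
      (((PySem.Str.split? (PySem.Str.strip ((PySem.List.pyGet? ((PySem.Str.splitMax? s ":" 1).getD []) 1).getD "")) ",").getD []).map PySem.Str.strip).filter (fun k => !(k == "")))
  else if !(s == "") && st.2.1 == "" && !PySem.Str.startswith s "#" then
    (st.1, s, st.2.2.1, st.2.2.2)
  else
    st

-- per-field steps of the decomposed loop
def pvNStep (n : String) (s : String) : String :=
  if PySem.Str.startswith s "# " && n == "" then PySem.Str.strip (PySem.Str.slice s (some 2) none) else n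
def pvDStep (d : String) (s : String) : String :=
  if (!(s == "") && !PySem.Str.startswith s "#" && !pvIsCat s && !pvIsKw s) && d == "" then s else d
def pvCStep (c : String) (s : String) : String :=
  if pvIsCat s then PySem.Str.lower (pvColonRest s) else c
def pvKStep (k : List String) (s : String) : List String :=
  if pvIsKw s then (((PySem.Str.split? (pvColonRest s) ",").getD []).map PySem.Str.strip).filter (fun k => !(k == "")) else k

-- exclusivity of the line classes
lemma pv_cat_not_name (s : String) (hc : PySem.Str.startswith (PySem.Str.lower s) "category:" = true) :
    PySem.Str.startswith s "# " = false := by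
  rw [PySem.Str.startswith_eq, ← Bool.not_eq_true, PySem.Chars.startswith_iff]
  intro hn
  obtain ⟨t, ht⟩ := hn
  rw [PySem.Str.startswith_eq, PySem.Chars.startswith_iff, PySem.Str.toList_lower] at hc
  obtain ⟨u, hu⟩ := hc
  rw [← ht] at hu
  simp [PySem.Chars.lower] at hu
  have : PySem.Chars.lowerChar '#' = '#' := by decide
  simp [this] at hu

lemma pv_kw_not_name (s : String) (hc : PySem.Str.startswith (PySem.Str.lower s) "keywords:" = true) :
    PySem.Str.startswith s "# " = false := by
  rw [PySem.Str.startswith_eq, ← Bool.not_eq_true, PySem.Chars.startswith_iff]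
  intro hn
  obtain ⟨t, ht⟩ := hn
  rw [PySem.Str.startswith_eq, PySem.Chars.startswith_iff, PySem.Str.toList_lower] at hc
  obtain ⟨u, hu⟩ := hc
  rw [← ht] at hu
  simp [PySem.Chars.lower] at hu
  have : PySem.Chars.lowerChar '#' = '#' := by decide
  simp [this] at hu

lemma pv_kw_not_cat (s : String) (hk : PySem.Str.startswith (PySem.Str.lower s) "keywords:" = true) :
    PySem.Str.startswith (PySem.Str.lower s) "category:" = false := by
  rw [PySem.Str.startswith_eq, PySem.Chars.startswith_iff] at hk
  rw [PySem.Str.startswith_eq, ← Bool.not_eq_true, PySem.Chars.startswith_iff]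
  intro hc
  obtain ⟨u, hu⟩ := hk
  obtain ⟨v, hv⟩ := hc
  rw [← hu] at hv
  simp at hv

lemma pv_hash_of_hash_space (s : String) (h : PySem.Str.startswith s "# " = true) :
    PySem.Str.startswith s "#" = true := by
  rw [PySem.Str.startswith_eq, PySem.Chars.startswith_iff] at h ⊢
  exact List.IsPrefix.trans (by decide) h

-- one loop iteration updates the four fields independently
set_option maxHeartbeats 1000000 in
lemma pv_step_split (st : String × String × String × List String) (s : String) :
    pvStepS st s = (pvNStep st.1 s, pvDStep st.2.1 s, pvCStep st.2.2.1 s, pvKStep st.2.2.2 s) := by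
  obtain ⟨n, d, c, k⟩ := st
  simp only [pvStepS, pvNStep, pvDStep, pvCStep, pvKStep, pvIsCat, pvIsKw]
  by_cases hA : PySem.Str.startswith s "# " = true
  · have hC : PySem.Str.startswith (PySem.Str.lower s) "category:" = false := by
      by_contra h; simp only [Bool.not_eq_false] at h
      rw [pv_cat_not_name s h] at hA; exact Bool.noConfusion hA
    have hK : PySem.Str.startswith (PySem.Str.lower s) "keywords:" = false := by
      by_contra h; simp only [Bool.not_eq_false] at h
      rw [pv_kw_not_name s h] at hA; exact Bool.noConfusion hA
    have hH : PySem.Str.startswith s "#" = true := pv_hash_of_hash_space s hA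
    cases hnb : (n == "") <;>
      simp only [hA, hC, hK, hH, hnb, pvColonRest, Bool.true_and, Bool.and_true, Bool.false_and,
        Bool.and_false, Bool.not_true, Bool.not_false, Bool.false_eq_true, eq_self_iff_true, if_false, if_true]
  · have hA' : PySem.Str.startswith s "# " = false := by simpa using hA
    by_cases hC : PySem.Str.startswith (PySem.Str.lower s) "category:" = true
    · have hK : PySem.Str.startswith (PySem.Str.lower s) "keywords:" = false := by
        by_contra h; simp only [Bool.not_eq_false] at h
        rw [pv_kw_not_cat s h] at hC; exact Bool.noConfusion hC
      simp only [hA', hC, hK, pvColonRest, Bool.true_and, Bool.and_true, Bool.false_and,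
        Bool.and_false, Bool.not_true, Bool.not_false, Bool.false_eq_true, eq_self_iff_true, if_false, if_true]
    · have hC' : PySem.Str.startswith (PySem.Str.lower s) "category:" = false := by simpa using hC
      by_cases hK : PySem.Str.startswith (PySem.Str.lower s) "keywords:" = true
      · simp only [hA', hC', hK, Bool.true_and, Bool.and_true, Bool.false_and,
          Bool.and_false, Bool.not_true, Bool.not_false] <;> rfl
      · have hK' : PySem.Str.startswith (PySem.Str.lower s) "keywords:" = false := by simpa using hK
        cases heb : (s == "") <;> cases hH : PySem.Str.startswith s "#" <;> cases hdb : (d == "") <;>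
          simp only [hA', hC', hK', heb, hH, hdb, pvColonRest, Bool.true_and, Bool.and_true, Bool.false_and,
            Bool.and_false, Bool.not_true, Bool.not_false, Bool.false_eq_true, eq_self_iff_true, if_false, if_true]

-- the loop over the state splits into four independent folds
lemma pv_fold_split (L : List String) :
    ∀ (n d c : String) (k : List String),
      L.foldl pvStepS (n, d, c, k) = (L.foldl pvNStep n, L.foldl pvDStep d, L.foldl pvCStep c, L.foldl pvKStep k) := by
  induction L with
  | nil => intro n d c k; rfl
  | cons s L ih =>
    intro n d c k
    simp only [List.foldl_cons, pv_step_split]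
    exact ih _ _ _ _

-- category/keywords folds = last matching line
lemma pv_fold_last_cat (L : List String) :
    ∀ c : String, L.foldl pvCStep c =
      (match L.reverse.find? pvIsCat with
       | some s => PySem.Str.lower (pvColonRest s)
       | none => c) := by
  induction L with
  | nil => intro c; rfl
  | cons s L ih =>
    intro c
    simp only [List.foldl_cons, List.reverse_cons, List.find?_append, ih]
    cases h : L.reverse.find? pvIsCat with
    | some x => simp
    | none =>
      simp only [Option.none_or]
      cases hs : pvIsCat s <;> simp [List.find?, hs, pvCStep]

lemma pv_fold_last_kw (L : List String) :
    ∀ k : List String, L.foldl pvKStep k =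
      (match L.reverse.find? pvIsKw with
       | some s => (((PySem.Str.split? (pvColonRest s) ",").getD []).map PySem.Str.strip).filter (fun k => !(k == ""))
       | none => k) := by
  induction L with
  | nil => intro k; rfl
  | cons s L ih =>
    intro k
    simp only [List.foldl_cons, List.reverse_cons, List.find?_append, ih]
    cases h : L.reverse.find? pvIsKw with
    | some x => simp
    | none =>
      simp only [Option.none_or]
      cases hs : pvIsKw s <;> simp [List.find?, hs, pvKStep]

-- name fold = first '# '-line, provided the extracted name is never empty
lemma pv_fold_first_name (L : List String)
    (hne : ∀ s ∈ L, PySem.Str.startswith s "# " = true →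
      PySem.Str.strip (PySem.Str.slice s (some 2) none) ≠ "") :
    ∀ n : String, L.foldl pvNStep n =
      if n = "" then
        (match L.find? (fun s => PySem.Str.startswith s "# ") with
         | some s => PySem.Str.strip (PySem.Str.slice s (some 2) none)
         | none => "")
      else n := by
  induction L with
  | nil => intro n; cases h : decide (n = "") <;> simp_all
  | cons s L ih =>
    intro n
    have hne' : ∀ s ∈ L, PySem.Str.startswith s "# " = true →
        PySem.Str.strip (PySem.Str.slice s (some 2) none) ≠ "" := by
      intro x hx; exact hne x (List.mem_cons_of_mem _ hx)
    by_cases hn : n = ""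
    · subst hn
      by_cases hs : PySem.Str.startswith s "# " = true
      · have hx := hne s (List.mem_cons_self) hs
        have hstep : pvNStep "" s = PySem.Str.strip (PySem.Str.slice s (some 2) none) := by
          simp only [pvNStep, hs, Bool.true_and]; rfl
        have hf : List.find? (fun s => PySem.Str.startswith s "# ") (s :: L) = some s :=
          List.find?_cons_of_pos hs
        rw [List.foldl_cons, hstep, ih hne' _, hf, if_neg hx, if_pos rfl]
      · have hs' : PySem.Str.startswith s "# " = false := by simpa using hs
        have hstep : pvNStep "" s = "" := by
          simp only [pvNStep, hs', Bool.false_and]; rfl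
        have hf : List.find? (fun s => PySem.Str.startswith s "# ") (s :: L) =
            List.find? (fun s => PySem.Str.startswith s "# ") L :=
          List.find?_cons_of_neg hs
        rw [List.foldl_cons, hstep, ih hne' _, hf]
    · have hb : (n == "") = false := by simpa using hn
      have hstep : pvNStep n s = n := by
        simp only [pvNStep, hb, Bool.and_false]; rfl
      rw [List.foldl_cons, hstep, ih hne' n]
      simp [hn]

-- description fold = first plain line (such a line is nonempty by its own test)
lemma pv_fold_first_desc (L : List String) :
    ∀ d : String, L.foldl pvDStep d =
      if d = "" then
        (match L.find? (fun s => !(s == "") && !PySem.Str.startswith s "#" && !pvIsCat s && !pvIsKw s) with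
         | some s => s
         | none => "")
      else d := by
  induction L with
  | nil => intro d; cases h : decide (d = "") <;> simp_all
  | cons s L ih =>
    intro d
    by_cases hd : d = ""
    · subst hd
      by_cases hs : (!(s == "") && !PySem.Str.startswith s "#" && !pvIsCat s && !pvIsKw s) = true
      · have hx : s ≠ "" := by
          intro h; subst h; exact absurd hs (by decide)
        have hstep : pvDStep "" s = s := by
          simp only [pvDStep, hs, Bool.true_and]; rfl
        have hf : List.find? (fun s => !(s == "") && !PySem.Str.startswith s "#" && !pvIsCat s && !pvIsKw s) (s :: L) = some s :=
          List.find?_cons_of_pos hs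
        rw [List.foldl_cons, hstep, ih _, hf, if_neg hx, if_pos rfl]
      · have hs' : (!(s == "") && !PySem.Str.startswith s "#" && !pvIsCat s && !pvIsKw s) = false := by
          simpa using hs
        have hstep : pvDStep "" s = "" := by
          simp only [pvDStep, hs', Bool.false_and]; rfl
        have hf : List.find? (fun s => !(s == "") && !PySem.Str.startswith s "#" && !pvIsCat s && !pvIsKw s) (s :: L) =
            List.find? (fun s => !(s == "") && !PySem.Str.startswith s "#" && !pvIsCat s && !pvIsKw s) L :=
          List.find?_cons_of_neg hs
        rw [List.foldl_cons, hstep, ih _, hf]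
    · have hb : (d == "") = false := by simpa using hd
      have hstep : pvDStep d s = d := by
        simp only [pvDStep, hb, Bool.and_false]; rfl
      rw [List.foldl_cons, hstep, ih d]
      simp [hd]

-- a stripped line has no all-space tail: the text after '# ' strips to something nonempty
lemma pv_rstrip_idem (z : List Char) :
    PySem.Chars.rstrip (PySem.Chars.rstrip z) = PySem.Chars.rstrip z := by
  simp [PySem.Chars.rstrip, List.dropWhile_idempotent]

lemma pv_rstrip_append_spaces (a b : List Char) (hb : ∀ x ∈ b, PySem.Chars.isspace x = true) :
    PySem.Chars.rstrip (a ++ b) = PySem.Chars.rstrip a := by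
  simp only [PySem.Chars.rstrip, List.reverse_append]
  rw [List.dropWhile_append_of_pos (by simpa using hb)]

lemma pv_strip_eq_nil (r : List Char) (h : PySem.Chars.strip r = []) :
    ∀ x ∈ r, PySem.Chars.isspace x = true := by
  simp only [PySem.Chars.strip, PySem.Chars.rstrip, PySem.Chars.lstrip] at h
  rw [List.reverse_eq_nil_iff, List.dropWhile_eq_nil_iff] at h
  intro x hx
  by_cases hsp : PySem.Chars.isspace x = true
  · exact hsp
  · exfalso
    have hx2 : x ∈ List.takeWhile PySem.Chars.isspace r ++ List.dropWhile PySem.Chars.isspace r := by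
      rw [List.takeWhile_append_dropWhile]; exact hx
    rcases List.mem_append.mp hx2 with hm | hm
    · exact hsp (List.mem_takeWhile_imp hm)
    · exact hsp (h x (by simpa using hm))

lemma pv_ext_ne (l : String)
    (h : PySem.Str.startswith (PySem.Str.strip l) "# " = true) :
    PySem.Str.strip (PySem.Str.slice (PySem.Str.strip l) (some 2) none) ≠ "" := by
  intro hc
  -- move to lists
  rw [PySem.Str.startswith_eq, PySem.Chars.startswith_iff] at h
  obtain ⟨r, hr⟩ := h
  rw [← String.toList_eq_nil_iff, PySem.Str.toList_strip, PySem.Str.toList_slice,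
    PySem.Chars.slice_eq_listSlice, PySem.List.slice_from _ (by norm_num)] at hc
  have h2 : List.drop (Int.toNat 2) (PySem.Str.strip l).toList = r := by
    rw [← hr]; rfl
  rw [h2] at hc
  have hall : ∀ x ∈ r, PySem.Chars.isspace x = true := pv_strip_eq_nil r hc
  -- (strip l).toList = '#' :: ' ' :: r has an all-space tail r, yet rstrip fixes it
  have hfix : PySem.Chars.rstrip ((PySem.Str.strip l).toList) = (PySem.Str.strip l).toList := by
    rw [PySem.Str.toList_strip, PySem.Chars.strip, pv_rstrip_idem]
  rw [← hr] at hfix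
  have : PySem.Chars.rstrip ("# ".toList ++ r) = PySem.Chars.rstrip "# ".toList :=
    pv_rstrip_append_spaces _ r hall
  rw [this] at hfix
  have : PySem.Chars.rstrip "# ".toList = ['#'] := by decide
  rw [this] at hfix
  simp at hfix

-- ===== VERDICT (by name: the statement is the Claim_ definition above) =====
theorem parse_kernel_md_py_spec : Claim_equal_parse_kernel_md_py := by
  intro content _
  unfold Spec_parse_kernel_md_py parse_kernel_md_py parse_kernel_md_py_alt
  set L0 : List String := (PySem.Str.split? (PySem.Str.strip content) "\n").getD [] with hL0
  have hA : L0.foldl pvAStep ("", "", "general", []) =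
      (L0.map PySem.Str.strip).foldl pvStepS ("", "", "general", []) := by
    rw [List.foldl_map]; rfl
  rw [hA]
  set L : List String := L0.map PySem.Str.strip with hL
  have hne : ∀ s ∈ L, PySem.Str.startswith s "# " = true →
      PySem.Str.strip (PySem.Str.slice s (some 2) none) ≠ "" := by
    intro s hs
    rw [hL] at hs
    obtain ⟨l, _, rfl⟩ := List.mem_map.mp hs
    exact pv_ext_ne l
  rw [pv_fold_split L "" "" "general" []]
  rw [pv_fold_first_name L hne "", pv_fold_first_desc L "", pv_fold_last_cat L "general",
    pv_fold_last_kw L []]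
  simp [pvColonRest]
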